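-- pv_equiv track=rewrite | github.com/todorescu-diana/beat_tracking_v2 | utils/utils.py | get_all_except_longest_continuous_segment_bounds
-- ===== SOURCE A (Python) =====
-- def get_all_except_longest_continuous_segment_bounds(bool_list):
--     max_length = 0
--     current_length = 0
--     lower_bound = 0
--     upper_bound = 0
--     max_lower_bound = 0
--     max_upper_bound = 0
--
--     all_bound_except_longest = []
--
--     for index, value in enumerate(bool_list):
--         if value:
--             current_length += 1
--             if current_length == 1:
--                 lower_bound = index  # update lower bound
--             upper_bound = index  # update upper bound
--         else:
--             if current_length > max_length:
--                 max_length = current_length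
--                 all_bound_except_longest.append((lower_bound, upper_bound))
--                 max_lower_bound = lower_bound  # update max lower bound
--                 max_upper_bound = upper_bound  # update max upper bound
--             current_length = 0
--
--     # check if the last segment is the longest
--     if current_length > max_length:
--         all_bound_except_longest.append((lower_bound, upper_bound))
--         max_length = current_length
--         max_lower_bound = lower_bound
--         max_upper_bound = upper_bound
--
--     filtered_all_bound_except_longest = [t for t in all_bound_except_longest if t != (max_lower_bound, max_upper_bound)]
--
--     return filtered_all_bound_except_longest
-- ===== SOURCE B (Python) =====
-- def get_all_except_longest_continuous_segment_bounds(bool_list):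
--     # Pass 1: collect all maximal True-run bounds (inclusive).
--     runs = []
--     start = None
--     for i, v in enumerate(bool_list):
--         if v:
--             if start is None:
--                 start = i
--         else:
--             if start is not None:
--                 runs.append((start, i - 1))
--                 start = None
--     if start is not None:
--         runs.append((start, len(bool_list) - 1))
--     # Pass 2: keep the prefix strict maxima by length.
--     maxima = []
--     best = 0
--     for lo, hi in runs:
--         if hi - lo + 1 > best:
--             best = hi - lo + 1
--             maxima.append((lo, hi))
--     # Drop the last (= longest) of the kept segments.
--     return maxima[:-1]
-- ===== Notes on version B (the rewrite author's own statement) =====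
-- stated objective: simpler
-- what changed: A's single loop over seven mutable variables is replaced by two short passes: collect all maximal True-run bounds, then keep the prefix strict maxima by length and drop the last (longest) one instead of filtering by the max tuple.
import Mathlib
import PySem

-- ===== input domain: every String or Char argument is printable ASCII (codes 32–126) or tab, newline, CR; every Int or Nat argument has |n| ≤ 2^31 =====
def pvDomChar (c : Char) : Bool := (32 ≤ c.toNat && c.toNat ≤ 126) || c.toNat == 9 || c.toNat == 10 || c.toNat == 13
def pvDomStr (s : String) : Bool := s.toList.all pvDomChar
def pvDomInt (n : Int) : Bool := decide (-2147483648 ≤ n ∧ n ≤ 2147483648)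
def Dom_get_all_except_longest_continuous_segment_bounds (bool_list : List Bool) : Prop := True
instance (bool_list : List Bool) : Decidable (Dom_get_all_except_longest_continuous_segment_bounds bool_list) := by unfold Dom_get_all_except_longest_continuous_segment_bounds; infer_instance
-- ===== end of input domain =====

-- B replaces A's single loop over seven mutable variables by two short passes (collect all
-- True-run bounds, then keep the prefix strict maxima and drop the last); objective: simpler.

-- ===== PORT A =====
-- A's for-loop over enumerate(bool_list): structural recursion carrying the index and the
-- seven loop variables (max_length, current_length, lower, upper, max_lower, max_upper, acc).
def aLoop (l : List Bool) (index max_length current_length lower upper max_lower max_upper : Int)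
    (acc : List (Int × Int)) : Int × Int × Int × Int × Int × Int × List (Int × Int) :=
  match l with
  | [] => (max_length, current_length, lower, upper, max_lower, max_upper, acc)
  | v :: rest =>
    if v then
      let current := current_length + 1
      let lower' := if current = 1 then index else lower
      aLoop rest (index + 1) max_length current lower' index max_lower max_upper acc
    else
      if current_length > max_length then
        aLoop rest (index + 1) current_length 0 lower upper lower upper (acc ++ [(lower, upper)])
      else
        aLoop rest (index + 1) max_length 0 lower upper max_lower max_upper acc

def get_all_except_longest_continuous_segment_bounds (bool_list : List Bool) : List (Int × Int) :=
  match aLoop bool_list 0 0 0 0 0 0 0 [] with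
  | (max_length, current_length, lower, upper, max_lower, max_upper, acc) =>
    -- check if the last segment is the longest
    let (max_lower, max_upper, acc) :=
      if current_length > max_length then (lower, upper, acc ++ [(lower, upper)])
      else (max_lower, max_upper, acc)
    acc.filter (fun t => t ≠ (max_lower, max_upper))

-- ===== PORT B =====
-- Pass 1 of Source B: collect all maximal True-run bounds (start : Option Int, runs accumulator).
def runsGo (l : List Bool) (i : Int) (start : Option Int) (runs : List (Int × Int)) : List (Int × Int) :=
  match l with
  | [] =>
    match start with
    | some s => runs ++ [(s, i - 1)]
    | none => runs
  | v :: rest =>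
    if v then
      runsGo rest (i + 1) (match start with | none => some i | some s => some s) runs
    else
      match start with
      | some s => runsGo rest (i + 1) none (runs ++ [(s, i - 1)])
      | none => runsGo rest (i + 1) none runs

-- Pass 2 of Source B: prefix strict maxima by length.
def maximaGo (runs : List (Int × Int)) (best : Int) (acc : List (Int × Int)) : List (Int × Int) :=
  match runs with
  | [] => acc
  | (lo, hi) :: rest =>
    if hi - lo + 1 > best then maximaGo rest (hi - lo + 1) (acc ++ [(lo, hi)])
    else maximaGo rest best acc

def get_all_except_longest_continuous_segment_bounds_alt (bool_list : List Bool) : List (Int × Int) :=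
  (maximaGo (runsGo bool_list 0 none []) 0 []).dropLast  -- maxima[:-1]

-- ===== PRECONDITION & SPEC =====
def Spec_get_all_except_longest_continuous_segment_bounds (bool_list : List Bool) (out : List (Int × Int)) : Prop := out = get_all_except_longest_continuous_segment_bounds_alt bool_list
instance (bool_list : List Bool) (out : List (Int × Int)) : Decidable (Spec_get_all_except_longest_continuous_segment_bounds bool_list out) := by unfold Spec_get_all_except_longest_continuous_segment_bounds; infer_instance

-- ===== CLAIM (what is proved, stated in full; the proofs are below) =====
def Claim_equal_get_all_except_longest_continuous_segment_bounds : Prop := ∀ (bool_list : List Bool), Dom_get_all_except_longest_continuous_segment_bounds bool_list → Spec_get_all_except_longest_continuous_segment_bounds bool_list (get_all_except_longest_continuous_segment_bounds bool_list)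

-- ===== LEMMAS AND PROOFS =====

-- Proof-side version of pass 2 that also tracks (max_lower, max_upper) like A does.
def pass2S (runs : List (Int × Int)) (best mlo mhi : Int) (acc : List (Int × Int)) :
    Int × Int × Int × List (Int × Int) :=
  match runs with
  | [] => (best, mlo, mhi, acc)
  | (lo, hi) :: rest =>
    if hi - lo + 1 > best then pass2S rest (hi - lo + 1) lo hi (acc ++ [(lo, hi)])
    else pass2S rest best mlo mhi acc

-- A's loop followed by its end-of-list check, as one function of the starting state.
def aFin (l : List Bool) (index maxL curL lo hi mlo mhi : Int) (acc : List (Int × Int)) :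
    Int × Int × Int × List (Int × Int) :=
  match aLoop l index maxL curL lo hi mlo mhi acc with
  | (maxL', curL', lo', hi', mlo', mhi', acc') =>
    if curL' > maxL' then (curL', lo', hi', acc' ++ [(lo', hi')])
    else (maxL', mlo', mhi', acc')

lemma runsGo_append (l : List Bool) (i : Int) (start : Option Int) (rs : List (Int × Int)) :
    runsGo l i start rs = rs ++ runsGo l i start [] := by
  induction l generalizing i start rs with
  | nil => cases start <;> simp [runsGo]
  | cons v rest ih =>
    cases start with
    | none =>
      by_cases hv : v = true <;> simp [runsGo, hv]
      · rw [ih]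
      · rw [ih, ih (rs := [])]
    | some s =>
      by_cases hv : v = true <;> simp [runsGo, hv]
      · rw [ih]
      · rw [ih, ih (rs := [(s, i - 1)])]; simp

lemma pass2S_acc (runs : List (Int × Int)) (best mlo mhi : Int) (acc : List (Int × Int)) :
    (pass2S runs best mlo mhi acc).2.2.2 = maximaGo runs best acc := by
  induction runs generalizing best mlo mhi acc with
  | nil => rfl
  | cons r rest ih =>
    obtain ⟨lo, hi⟩ := r
    by_cases h : hi - lo + 1 > best <;> simp [pass2S, maximaGo, h, ih]

-- Key simulation lemma: A's loop + end-check equals B's pass 2 applied to B's pass-1 runs.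
lemma key (l : List Bool) : ∀ (index maxL curL lo hi mlo mhi : Int) (acc : List (Int × Int)),
    0 ≤ maxL →
    (curL = 0 ∨ (0 < curL ∧ curL = index - lo ∧ hi = index - 1)) →
    aFin l index maxL curL lo hi mlo mhi acc =
      pass2S (runsGo l index (if curL = 0 then none else some lo) []) maxL mlo mhi acc := by
  induction l with
  | nil =>
    intro index maxL curL lo hi mlo mhi acc h0 hinv
    rcases hinv with h | ⟨hpos, hlen, hhi⟩
    · subst h
      simp [aFin, aLoop, runsGo, pass2S, not_lt.mpr h0]
    · have hne : ¬ curL = 0 := by omega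
      by_cases hc : curL > maxL
      · simp [aFin, aLoop, runsGo, pass2S, hne, hc, hhi,
              (show index - 1 - lo + 1 = curL by omega)]
      · simp [aFin, aLoop, runsGo, pass2S, hne, hc, hhi]
        omega
  | cons v rest ih =>
    intro index maxL curL lo hi mlo mhi acc h0 hinv
    by_cases hv : v = true
    · -- True: extend the current run
      have hstep : aFin (v :: rest) index maxL curL lo hi mlo mhi acc =
          aFin rest (index + 1) maxL (curL + 1)
            (if curL + 1 = 1 then index else lo) index mlo mhi acc := by
        simp [aFin, aLoop, hv]
      by_cases hz : curL = 0
      · subst hz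
        norm_num at hstep
        rw [hstep, ih (index + 1) maxL 1 index index mlo mhi acc h0 (by omega)]
        simp [runsGo, hv]
      · rcases hinv with h | ⟨hpos, hlen, hhi⟩
        · omega
        · have h1 : ¬ (curL + 1 = 1) := by omega
          rw [if_neg h1] at hstep
          rw [hstep, ih (index + 1) maxL (curL + 1) lo index mlo mhi acc h0 (by omega)]
          simp [runsGo, hv, hz]
          have : ¬ (curL + 1 = 0) := by omega
          simp [this]
    · -- False: possibly flush the run
      have hv' : v = false := by simpa using hv
      subst hv'
      by_cases hz : curL = 0
      · subst hz
        have hstep : aFin (false :: rest) index maxL 0 lo hi mlo mhi acc =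
            aFin rest (index + 1) maxL 0 lo hi mlo mhi acc := by
          simp [aFin, aLoop, (show ¬ ((0:Int) > maxL) by omega)]
        rw [hstep, ih (index + 1) maxL 0 lo hi mlo mhi acc h0 (Or.inl rfl)]
        simp [runsGo]
      · rcases hinv with h | ⟨hpos, hlen, hhi⟩
        · omega
        · have hrhs : runsGo (false :: rest) index (if curL = 0 then none else some lo) [] =
              (lo, index - 1) :: runsGo rest (index + 1) none [] := by
            simp [runsGo, hz]
            rw [runsGo_append]
            simp
          rw [hrhs]
          have hl : index - 1 - lo + 1 = curL := by omega
          by_cases hc : curL > maxL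
          · have hstep : aFin (false :: rest) index maxL curL lo hi mlo mhi acc =
                aFin rest (index + 1) curL 0 lo hi lo hi (acc ++ [(lo, hi)]) := by
              simp [aFin, aLoop, hc]
            rw [hstep, ih (index + 1) curL 0 lo hi lo hi (acc ++ [(lo, hi)]) (by omega) (Or.inl rfl)]
            simp [pass2S, hl, hc, hhi]
          · have hstep : aFin (false :: rest) index maxL curL lo hi mlo mhi acc =
                aFin rest (index + 1) maxL 0 lo hi mlo mhi acc := by
              simp [aFin, aLoop, hc]
            rw [hstep, ih (index + 1) maxL 0 lo hi mlo mhi acc h0 (Or.inl rfl)]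
            simp [pass2S, hl, hc]

-- The runs produced by pass 1 have first components bounded below, and strictly increasing.
lemma runs_lb (l : List Bool) : ∀ (i b : Int) (start : Option Int),
    (∀ s, start = some s → b ≤ s) → b ≤ i →
    ∀ r ∈ runsGo l i start [], b ≤ r.1 := by
  induction l with
  | nil =>
    intro i b start hs hbi r hr
    cases start with
    | none => simp [runsGo] at hr
    | some s => simp [runsGo] at hr; rw [hr]; exact hs s rfl
  | cons v rest ih =>
    intro i b start hs hbi r hr
    by_cases hv : v = true
    · cases start with
      | none =>
        rw [show runsGo (v :: rest) i none [] = runsGo rest (i + 1) (some i) [] by simp [runsGo, hv]] at hr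
        exact ih (i + 1) b (some i) (by intro s h; injection h with h; omega) (by omega) r hr
      | some s =>
        rw [show runsGo (v :: rest) i (some s) [] = runsGo rest (i + 1) (some s) [] by simp [runsGo, hv]] at hr
        exact ih (i + 1) b (some s) hs (by omega) r hr
    · have hv' : v = false := by simpa using hv
      subst hv'
      cases start with
      | none =>
        rw [show runsGo (false :: rest) i none [] = runsGo rest (i + 1) none [] by simp [runsGo]] at hr
        exact ih (i + 1) b none (by intro s h; cases h) (by omega) r hr
      | some s =>
        rw [show runsGo (false :: rest) i (some s) [] = runsGo rest (i + 1) none [(s, i - 1)] by simp [runsGo]] at hr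
        rw [runsGo_append] at hr
        rcases List.mem_append.mp hr with hr | hr
        · simp at hr; rw [hr]; exact hs s rfl
        · exact ih (i + 1) b none (by intro s h; cases h) (by omega) r hr

lemma runs_pairwise (l : List Bool) : ∀ (i : Int) (start : Option Int),
    (∀ s, start = some s → s ≤ i) →
    (runsGo l i start []).Pairwise (fun p q => p.1 < q.1) := by
  induction l with
  | nil =>
    intro i start hs
    cases start <;> simp [runsGo]
  | cons v rest ih =>
    intro i start hs
    by_cases hv : v = true
    · cases start with
      | none =>
        rw [show runsGo (v :: rest) i none [] = runsGo rest (i + 1) (some i) [] by simp [runsGo, hv]]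
        exact ih (i + 1) (some i) (by intro s h; injection h with h; omega)
      | some s =>
        rw [show runsGo (v :: rest) i (some s) [] = runsGo rest (i + 1) (some s) [] by simp [runsGo, hv]]
        exact ih (i + 1) (some s) (by intro s' h; injection h with h; subst h; have := hs s rfl; omega)
    · have hv' : v = false := by simpa using hv
      subst hv'
      cases start with
      | none =>
        rw [show runsGo (false :: rest) i none [] = runsGo rest (i + 1) none [] by simp [runsGo]]
        exact ih (i + 1) none (by intro s h; cases h)
      | some s =>
        rw [show runsGo (false :: rest) i (some s) [] = runsGo rest (i + 1) none [(s, i - 1)] by simp [runsGo]]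
        rw [runsGo_append]
        refine List.pairwise_cons.mpr ⟨?_, ih (i + 1) none (by intro s h; cases h)⟩
        intro r hr
        have hb := runs_lb rest (i + 1) (i + 1) none (by intro s h; cases h) le_rfl r hr
        have := hs s rfl
        simp
        omega

-- Filtering out the tracked maximum from pass2S's accumulator drops exactly its last element.
lemma filt (runs : List (Int × Int)) : ∀ (best mlo mhi : Int) (acc : List (Int × Int)),
    (acc ++ runs).Pairwise (fun p q => p.1 < q.1) →
    acc.filter (fun t => t ≠ (mlo, mhi)) = acc.dropLast →
    (pass2S runs best mlo mhi acc).2.2.2.filter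
        (fun t => t ≠ ((pass2S runs best mlo mhi acc).2.1, (pass2S runs best mlo mhi acc).2.2.1)) =
      (pass2S runs best mlo mhi acc).2.2.2.dropLast := by
  induction runs with
  | nil => intro best mlo mhi acc _ h2; simpa [pass2S] using h2
  | cons r rest ih =>
    intro best mlo mhi acc h1 h2
    obtain ⟨lo, hi⟩ := r
    by_cases hc : hi - lo + 1 > best
    · simp only [pass2S, if_pos hc]
      apply ih
      · simpa using h1
      · have hne : ∀ x ∈ acc, x.1 < lo :=
          fun x hx => (List.pairwise_append.mp h1).2.2 x hx (lo, hi) (by simp)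
        have h3 : acc.filter (fun t => t ≠ (lo, hi)) = acc := by
          apply List.filter_eq_self.mpr
          intro x hx
          have hlt := hne x hx
          simp only [ne_eq, decide_eq_true_eq]
          intro h; rw [h] at hlt; simp at hlt
        rw [List.filter_append, h3]
        simp
    · simp only [pass2S, if_neg hc]
      apply ih
      · exact h1.sublist (by simp)
      · exact h2

-- A's whole function, written through aFin.
lemma a_eq_aFin (l : List Bool) :
    get_all_except_longest_continuous_segment_bounds l =
      (aFin l 0 0 0 0 0 0 0 []).2.2.2.filter
        (fun t => t ≠ ((aFin l 0 0 0 0 0 0 0 []).2.1, (aFin l 0 0 0 0 0 0 0 []).2.2.1)) := by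
  unfold get_all_except_longest_continuous_segment_bounds aFin
  rcases h : aLoop l 0 0 0 0 0 0 0 [] with ⟨maxL, curL, lo, hi, mlo, mhi, acc⟩
  by_cases hc : curL > maxL <;> simp [hc]

-- ===== VERDICT (by name: the statement is the Claim_ definition above) =====
theorem get_all_except_longest_continuous_segment_bounds_spec : Claim_equal_get_all_except_longest_continuous_segment_bounds := by
  intro l _
  unfold Spec_get_all_except_longest_continuous_segment_bounds
  unfold get_all_except_longest_continuous_segment_bounds_alt
  rw [a_eq_aFin l]
  rw [key l 0 0 0 0 0 0 0 [] le_rfl (Or.inl rfl)]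
  rw [← pass2S_acc (runsGo l 0 none []) 0 0 0 []]
  apply filt
  · simpa using runs_pairwise l 0 none (by intro s h; cases h)
  · simp
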